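-- pv_equiv track=rewrite | github.com/MikeAlwaysCode/algorithm_py | Contests/LeetCodePython/6127.优质数对的数目.py | countExcellentPairs
-- ===== SOURCE A (Python) =====
-- from typing import List
--
-- def countExcellentPairs(nums: List[int], k: int) -> int:
--     # ct = Counter(x.bit_count() for x in set(nums))
--     # ans = 0
--     # for ak, av in ct.items():
--     #     for bk, bv in ct.items():
--     #         if ak + bk >= k:
--     #             ans += av * bv
--     # return ans
--     ans = 0
--     ct = [0] * 30
--     for x in set(nums):
--         ct[x.bit_count()] += 1
--     s = sum(ct[k:])
--     for i, c in enumerate(ct):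
--         ans += c * s
--         if 0 <= k - i - 1 < 30:
--             s += ct[k - i - 1]
--     return ans
-- ===== SOURCE B (Python) =====
-- def countExcellentPairs(nums, k):
--     ct = [0] * 30
--     for x in set(nums):
--         ct[x.bit_count()] += 1
--     ans = 0
--     for i in range(30):
--         for j in range(30):
--             if i + j >= k:
--                 ans += ct[i] * ct[j]
--     return ans
-- ===== Notes on version B (the rewrite author's own statement) =====
-- stated objective: simpler
-- what changed: Replaces A's single-pass running-suffix-sum trick over the 30 popcount buckets (slice sum seeded, then incrementally shifted while enumerating) with a direct nested 30x30 enumeration of bucket pairs adding ct[i]*ct[j] whenever i+j >= k.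
-- intended difference: For -30 < k < 0 (and some element with popcount below 30+k), A's sum(ct[k:]) seeds the suffix sum with only the last |k| buckets, so A returns n*s (s = distinct values with popcount >= 30+k) instead of the intended n*n, the count of all ordered pairs, which every pair satisfies when k < 0; B returns n*n. — e.g. on countExcellentPairs([1], -1): A returns 0, B returns 1
import Mathlib
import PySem

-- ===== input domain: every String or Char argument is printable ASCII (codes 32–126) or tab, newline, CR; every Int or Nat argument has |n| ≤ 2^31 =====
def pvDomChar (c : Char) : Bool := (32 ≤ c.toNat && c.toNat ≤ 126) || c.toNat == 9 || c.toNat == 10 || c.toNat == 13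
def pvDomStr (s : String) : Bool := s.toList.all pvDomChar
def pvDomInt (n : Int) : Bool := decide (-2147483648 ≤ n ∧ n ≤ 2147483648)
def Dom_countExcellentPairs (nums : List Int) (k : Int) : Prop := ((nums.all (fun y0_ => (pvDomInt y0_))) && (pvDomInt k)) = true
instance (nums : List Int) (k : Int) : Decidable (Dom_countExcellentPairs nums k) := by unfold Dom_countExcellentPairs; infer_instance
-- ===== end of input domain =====

-- B replaces A's running-suffix-sum single pass over the 30 popcount buckets by a plain
-- nested 30×30 enumeration of bucket pairs (objective: simpler); same histogram over set(nums).

-- shared helper: the popcount histogram ct (both Pythons build it with identical code)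
def pvHist (nums : List Int) : List Int :=
  (PySem.Set.ofList nums).foldl
    (fun ct x =>
      PySem.List.pySetD ct ((PySem.Int.bitCount x : Nat) : Int)
        (PySem.List.pyGetD ct ((PySem.Int.bitCount x : Nat) : Int) 0 + 1))
    (List.replicate 30 0)

-- ===== PORT A =====
def countExcellentPairs (nums : List Int) (k : Int) : Int :=
  let ct := pvHist nums
  let s : Int := (PySem.List.slice ct (some k) none).sum
  let r :=
    (PySem.List.enumerate ct 0).foldl
      (fun (p : Int × Int) (e : Int × Int) =>
        (p.1 + e.2 * p.2,
         if 0 ≤ k - e.1 - 1 ∧ k - e.1 - 1 < 30 then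
           p.2 + PySem.List.pyGetD ct (k - e.1 - 1) 0
         else p.2))
      (0, s)
  r.1

-- ===== PORT B =====
def countExcellentPairs_alt (nums : List Int) (k : Int) : Int :=
  let ct := pvHist nums
  (PySem.List.pyRange 0 30 1).foldl
    (fun ans i =>
      (PySem.List.pyRange 0 30 1).foldl
        (fun ans j =>
          if k ≤ i + j then ans + PySem.List.pyGetD ct i 0 * PySem.List.pyGetD ct j 0 else ans)
        ans)
    0

-- ===== PRECONDITION & SPEC =====
-- Pre_ excludes exactly the inputs where A raises IndexError: some element's popcount is ≥ 30.
def Pre_countExcellentPairs (nums : List Int) (k : Int) : Prop :=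
  ∀ x ∈ nums, PySem.Int.bitCount x < 30
instance (nums : List Int) (k : Int) : Decidable (Pre_countExcellentPairs nums k) := by
  unfold Pre_countExcellentPairs; infer_instance
def pvWitness_countExcellentPairs : List Int × Int := ([1, 2, 3], 2)

-- For -30 < k < 0 (with some element of popcount < 30+k), A's sum(ct[k:]) seeds the suffix sum
-- with only the last |k| buckets, so A returns n*s (s = number of distinct values with popcount
-- ≥ 30+k) instead of the intended n*n — for k < 0 every ordered pair meets the threshold; B returns n*n.
def D_countExcellentPairs (nums : List Int) (k : Int) : Prop :=
  -30 < k ∧ k < 0 ∧ ∃ x ∈ nums, (PySem.Int.bitCount x : Int) < 30 + k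
instance (nums : List Int) (k : Int) : Decidable (D_countExcellentPairs nums k) := by
  unfold D_countExcellentPairs; infer_instance

def Spec_countExcellentPairs (nums : List Int) (k : Int) (out : Int) : Prop :=
  ¬ D_countExcellentPairs nums k → out = countExcellentPairs_alt nums k
instance (nums : List Int) (k : Int) (out : Int) : Decidable (Spec_countExcellentPairs nums k out) := by
  unfold Spec_countExcellentPairs; infer_instance

def pvDiffWitness_countExcellentPairs : List Int × Int := ([1], -1)
def pvDiffWitnessOut_countExcellentPairs : Int × Int := (0, 1)

-- ===== CLAIM (what is proved, stated in full; the proofs are below) =====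
def Claim_unchanged_countExcellentPairs : Prop := ∀ (nums : List Int) (k : Int), Dom_countExcellentPairs nums k → Pre_countExcellentPairs nums k → Spec_countExcellentPairs nums k (countExcellentPairs nums k)
def Claim_changed_countExcellentPairs : Prop := Dom_countExcellentPairs (pvDiffWitness_countExcellentPairs.1) (pvDiffWitness_countExcellentPairs.2) ∧ Pre_countExcellentPairs (pvDiffWitness_countExcellentPairs.1) (pvDiffWitness_countExcellentPairs.2) ∧ D_countExcellentPairs (pvDiffWitness_countExcellentPairs.1) (pvDiffWitness_countExcellentPairs.2) ∧ countExcellentPairs (pvDiffWitness_countExcellentPairs.1) (pvDiffWitness_countExcellentPairs.2) = pvDiffWitnessOut_countExcellentPairs.1 ∧ countExcellentPairs_alt (pvDiffWitness_countExcellentPairs.1) (pvDiffWitness_countExcellentPairs.2) = pvDiffWitnessOut_countExcellentPairs.2 ∧ pvDiffWitnessOut_countExcellentPairs.1 ≠ pvDiffWitnessOut_countExcellentPairs.2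
def Claim_exact_countExcellentPairs : Prop := ∀ (nums : List Int) (k : Int), Dom_countExcellentPairs nums k → Pre_countExcellentPairs nums k → D_countExcellentPairs nums k → countExcellentPairs nums k ≠ countExcellentPairs_alt nums k

-- ===== LEMMAS AND PROOFS =====

def pvStep (ct : List Int) (x : Int) : List Int :=
  PySem.List.pySetD ct ((PySem.Int.bitCount x : Nat) : Int)
    (PySem.List.pyGetD ct ((PySem.Int.bitCount x : Nat) : Int) 0 + 1)

lemma pvStep_eq (ct : List Int) (x : Int) :
    pvStep ct x = ct.set (PySem.Int.bitCount x) (ct.getD (PySem.Int.bitCount x) 0 + 1) := by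
  simp [pvStep]

lemma pvHist_core (l : List Int) : ∀ (ct : List Int), ct.length = 30 →
    (∀ x ∈ l, PySem.Int.bitCount x < 30) →
    (l.foldl pvStep ct).length = 30 ∧
      ∀ i : Nat, (l.foldl pvStep ct).getD i 0
        = ct.getD i 0 + (l.countP (fun x => PySem.Int.bitCount x == i) : Int) := by
  induction l with
  | nil => intro ct h _; simpa using h
  | cons x t ih =>
    intro ct hlen hpc
    have hx : PySem.Int.bitCount x < 30 := hpc x (by simp)
    have hlen' : (pvStep ct x).length = 30 := by simp [pvStep_eq, hlen]
    obtain ⟨h1, h2⟩ := ih (pvStep ct x) hlen' (fun y hy => hpc y (by simp [hy]))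
    refine ⟨by simpa using h1, fun i => ?_⟩
    rw [List.foldl_cons, h2 i]
    rw [List.countP_cons]
    simp only [pvStep_eq]
    by_cases hi : PySem.Int.bitCount x = i
    · subst hi
      have : (ct.set (PySem.Int.bitCount x) (ct.getD (PySem.Int.bitCount x) 0 + 1)).getD (PySem.Int.bitCount x) 0
          = ct.getD (PySem.Int.bitCount x) 0 + 1 := by
        simp [List.getD, hlen ▸ hx]
      rw [this]; simp; ring
    · have : (ct.set (PySem.Int.bitCount x) (ct.getD (PySem.Int.bitCount x) 0 + 1)).getD i 0
          = ct.getD i 0 := by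
        simp [List.getD, hi]
      rw [this]; simp [hi]

def pvS (ct : List Int) (m : Int) : Int := (ct.drop (max m 0).toNat).sum

lemma pvS_step (ct : List Int) (h : ct.length = 30) (m : Int) :
    pvS ct (m - 1) = pvS ct m +
      (if 0 ≤ m - 1 ∧ m - 1 < 30 then PySem.List.pyGetD ct (m - 1) 0 else 0) := by
  by_cases h1 : 0 ≤ m - 1 ∧ m - 1 < 30
  · obtain ⟨ha, hb⟩ := h1
    have hn : (max (m-1) 0).toNat = (m-1).toNat := by omega
    have hn2 : (max m 0).toNat = (m-1).toNat + 1 := by omega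
    have hlt : (m-1).toNat < ct.length := by omega
    rw [if_pos ⟨ha, hb⟩]
    rw [PySem.List.pyGetD_eq_getElem ct 0 ha (by omega)]
    simp only [pvS, hn, hn2, List.drop_eq_getElem_cons hlt, List.sum_cons]
    ring
  · rw [if_neg h1]
    rcases lt_or_ge (m-1) 0 with hc | hc
    · have : (max (m-1) 0).toNat = 0 := by omega
      have h2 : (max m 0).toNat = 0 := by omega
      simp [pvS, this, h2]
    · have hge : 30 ≤ m - 1 := by omega
      have d1 : ct.length ≤ (max (m-1) 0).toNat := by omega
      have d2 : ct.length ≤ (max m 0).toNat := by omega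
      simp [pvS, List.drop_eq_nil_of_le d1, List.drop_eq_nil_of_le d2]

-- A's loop
lemma pvAloop (ct : List Int) (k : Int) (h : ct.length = 30) :
    ∀ (l : List Int) (i0 ans : Int),
      ((PySem.List.enumerate l i0).foldl
        (fun (p : Int × Int) (e : Int × Int) =>
          (p.1 + e.2 * p.2,
           if 0 ≤ k - e.1 - 1 ∧ k - e.1 - 1 < 30 then
             p.2 + PySem.List.pyGetD ct (k - e.1 - 1) 0
           else p.2))
        (ans, pvS ct (k - i0))).1
      = ans + ((PySem.List.enumerate l i0).map (fun e => e.2 * pvS ct (k - e.1))).sum := by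
  intro l
  induction l with
  | nil => intro i0 ans; simp [PySem.List.enumerate_nil]
  | cons x t ih =>
    intro i0 ans
    rw [PySem.List.enumerate_cons, List.foldl_cons]
    have hs : (if 0 ≤ k - i0 - 1 ∧ k - i0 - 1 < 30 then
        pvS ct (k - i0) + PySem.List.pyGetD ct (k - i0 - 1) 0 else pvS ct (k - i0))
        = pvS ct (k - (i0 + 1)) := by
      have := pvS_step ct h (k - i0)
      have he : k - i0 - 1 = k - (i0 + 1) := by ring
      rw [← he, this]
      by_cases hc : 0 ≤ k - i0 - 1 ∧ k - i0 - 1 < 30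
      · rw [if_pos hc, if_pos hc]
      · rw [if_neg hc, if_neg hc, add_zero]
    simp only [hs]
    rw [ih (i0 + 1) (ans + x * pvS ct (k - i0))]
    simp [List.map_cons, List.sum_cons]; ring

lemma pvFilter_pyRange (m : Int) : ∀ (n : Nat) (a b : Int), b - a ≤ n →
    (PySem.List.pyRange a b 1).filter (fun j => decide (m ≤ j)) = PySem.List.pyRange (max m a) b 1 := by
  intro n
  induction n with
  | zero =>
    intro a b hb
    rw [PySem.List.pyRange_one_eq_nil (by omega), PySem.List.pyRange_one_eq_nil (by omega)]
    simp
  | succ n ih =>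
    intro a b hb
    rcases (by omega : b ≤ a ∨ a < b) with hba | hab
    · rw [PySem.List.pyRange_one_eq_nil hba, PySem.List.pyRange_one_eq_nil (by omega)]
      simp
    · rw [PySem.List.pyRange_one_cons hab, List.filter_cons]
      by_cases hm : m ≤ a
      · rw [if_pos (by simpa using hm), ih (a+1) b (by omega)]
        have h1 : max m (a+1) = a + 1 := by omega
        have h2 : max m a = a := by omega
        rw [h1, h2, PySem.List.pyRange_one_cons hab]
      · rw [if_neg (by simpa using hm), ih (a+1) b (by omega)]
        have h1 : max m (a+1) = m := by omega
        have h2 : max m a = m := by omega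
        rw [h1, h2]

lemma pvBinner (ct : List Int) (h : ct.length = 30) (k i ans : Int) :
    (PySem.List.pyRange 0 30 1).foldl
      (fun ans j =>
        if k ≤ i + j then ans + PySem.List.pyGetD ct i 0 * PySem.List.pyGetD ct j 0 else ans)
      ans
    = ans + PySem.List.pyGetD ct i 0 * pvS ct (k - i) := by
  rw [PySem.List.foldl_ite_eq_foldl_filter (fun j => k ≤ i + j)
      (fun ans j => ans + PySem.List.pyGetD ct i 0 * PySem.List.pyGetD ct j 0)]
  have hfe : (PySem.List.pyRange 0 30 1).filter (fun j => decide (k ≤ i + j))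
      = (PySem.List.pyRange 0 30 1).filter (fun j => decide (k - i ≤ j)) := by
    apply List.filter_congr
    intro j _
    simp only [decide_eq_decide]
    omega
  rw [hfe, pvFilter_pyRange (k - i) 30 0 30 (by omega)]
  rw [PySem.List.foldl_add _ (fun j => PySem.List.pyGetD ct i 0 * PySem.List.pyGetD ct j 0) ans]
  have h30 : (30 : Int) = (PySem.List.len ct : Int) := by simp [h]
  have hdrop : (PySem.List.pyRange (max (k-i) 0) 30 1).map (fun j => PySem.List.pyGetD ct j 0)
      = ct.drop (max (k-i) 0).toNat := by
    rw [h30]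
    exact PySem.List.map_pyGetD_pyRange ct 0 (by omega)
  rw [List.sum_map_mul_left (PySem.List.pyRange (max (k-i) 0) 30 1)
        (fun j => PySem.List.pyGetD ct j 0) (PySem.List.pyGetD ct i 0), hdrop]
  rfl

lemma pvBouter (ct : List Int) (h : ct.length = 30) (k : Int) :
    (PySem.List.pyRange 0 30 1).foldl
      (fun ans i =>
        (PySem.List.pyRange 0 30 1).foldl
          (fun ans j =>
            if k ≤ i + j then ans + PySem.List.pyGetD ct i 0 * PySem.List.pyGetD ct j 0 else ans)
          ans)
      0
    = ((PySem.List.pyRange 0 30 1).map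
        (fun i => PySem.List.pyGetD ct i 0 * pvS ct (k - i))).sum := by
  have hcong :
      (PySem.List.pyRange 0 30 1).foldl
        (fun ans i =>
          (PySem.List.pyRange 0 30 1).foldl
            (fun ans j =>
              if k ≤ i + j then ans + PySem.List.pyGetD ct i 0 * PySem.List.pyGetD ct j 0 else ans)
            ans)
        0
      = (PySem.List.pyRange 0 30 1).foldl
          (fun ans i => ans + PySem.List.pyGetD ct i 0 * pvS ct (k - i)) 0 :=
    PySem.List.foldl_congr_mem _ _ _ _ (fun ans i _ => pvBinner ct h k i ans)
  rw [hcong, PySem.List.foldl_add]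
  simp

lemma pvA_sum (ct : List Int) (h : ct.length = 30) (k s0 : Int) (hs0 : s0 = pvS ct k) :
    ((PySem.List.enumerate ct 0).foldl
      (fun (p : Int × Int) (e : Int × Int) =>
        (p.1 + e.2 * p.2,
         if 0 ≤ k - e.1 - 1 ∧ k - e.1 - 1 < 30 then
           p.2 + PySem.List.pyGetD ct (k - e.1 - 1) 0
         else p.2))
      (0, s0)).1
    = ((PySem.List.pyRange 0 30 1).map
        (fun i => PySem.List.pyGetD ct i 0 * pvS ct (k - i))).sum := by
  have h0 : s0 = pvS ct (k - 0) := by simpa using hs0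
  rw [h0, pvAloop ct k h ct 0 0, zero_add]
  rw [PySem.List.enumerate_eq_map_pyRange ct 0]
  have h30 : (PySem.List.len ct : Int) = (30 : Int) := by simp [h]
  rw [h30, List.map_map]
  rfl

lemma pvSlice_nonneg (ct : List Int) (k : Int) (hk : 0 ≤ k) :
    (PySem.List.slice ct (some k) none).sum = pvS ct k := by
  rw [PySem.List.slice_from ct hk]
  unfold pvS
  congr 2
  omega

lemma pvClamp_neg (k : Int) (hk : k < 0) : PySem.List.clampIdx 30 k = (30 + k).toNat := by
  have h2 := PySem.List.clampIdx_neg_natCast (n := 30) (k := k.natAbs) (by omega)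
  have hke : k = -((k.natAbs : Nat) : Int) := by omega
  rw [hke, h2]
  omega

lemma pvSlice_neg (ct : List Int) (h : ct.length = 30) (k : Int) (hk : k < 0)
    (Hz : ∀ i : Nat, (i : Int) < 30 + k → ct.getD i 0 = 0) :
    (PySem.List.slice ct (some k) none).sum = pvS ct k := by
  rw [PySem.List.slice_some_none ct k, h, pvClamp_neg k hk]
  have hmax : (max k 0).toNat = 0 := by omega
  unfold pvS
  rw [hmax, List.drop_zero]
  have htake : (ct.take (30 + k).toNat).sum = 0 := by
    apply List.sum_eq_zero
    intro x hx
    obtain ⟨j, hj, hxe⟩ := List.mem_iff_getElem.mp hx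
    have hj' : j < (30 + k).toNat := by
      have := hj; simp [List.length_take, h] at this; omega
    have hjlen : j < ct.length := by omega
    rw [List.getElem_take] at hxe
    rw [← hxe, ← List.getD_eq_getElem ct 0 hjlen]
    exact Hz j (by omega)
  calc (ct.drop (30 + k).toNat).sum
      = (ct.take (30 + k).toNat).sum + (ct.drop (30 + k).toNat).sum := by rw [htake]; ring
    _ = ct.sum := List.sum_take_add_sum_drop ct _

lemma pvAloop_neg (ct : List Int) (k : Int) (hk : k < 0) :
    ∀ (l : List Int) (i0 ans s : Int), 0 ≤ i0 →
      ((PySem.List.enumerate l i0).foldl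
        (fun (p : Int × Int) (e : Int × Int) =>
          (p.1 + e.2 * p.2,
           if 0 ≤ k - e.1 - 1 ∧ k - e.1 - 1 < 30 then
             p.2 + PySem.List.pyGetD ct (k - e.1 - 1) 0
           else p.2))
        (ans, s)).1
      = ans + l.sum * s := by
  intro l
  induction l with
  | nil => intro i0 ans s _; simp [PySem.List.enumerate_nil]
  | cons x t ih =>
    intro i0 ans s hi0
    rw [PySem.List.enumerate_cons, List.foldl_cons]
    have hg : ¬ (0 ≤ k - i0 - 1 ∧ k - i0 - 1 < 30) := by omega
    simp only [if_neg hg]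
    rw [ih (i0 + 1) (ans + x * s) s (by omega)]
    simp [List.sum_cons]; ring

lemma pvSum_ge_entry (l : List Int) (i : Nat) (hpos : ∀ y ∈ l, 0 ≤ y) (hi : i < l.length) :
    l.getD i 0 ≤ l.sum := by
  have hsplit : (l.take i).sum + (l.drop i).sum = l.sum := List.sum_take_add_sum_drop l i
  rw [List.drop_eq_getElem_cons hi, List.sum_cons] at hsplit
  have h1 : 0 ≤ (l.take i).sum := List.sum_nonneg (fun y hy => hpos y (List.mem_of_mem_take hy))
  have h2 : 0 ≤ (l.drop (i+1)).sum := List.sum_nonneg (fun y hy => hpos y (List.mem_of_mem_drop hy))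
  rw [List.getD_eq_getElem l 0 hi]
  omega

lemma pvHist_eq_foldl (nums : List Int) :
    pvHist nums = (PySem.Set.ofList nums).foldl pvStep (List.replicate 30 0) := rfl

lemma pvReplicate_getD (i : Nat) : (List.replicate 30 (0:Int)).getD i 0 = 0 := by
  unfold List.getD
  rw [List.getElem?_replicate]
  by_cases h : i < 30 <;> simp [h]

lemma pvHist_facts (nums : List Int) (hpre : ∀ x ∈ nums, PySem.Int.bitCount x < 30) :
    (pvHist nums).length = 30 ∧
      ∀ i : Nat, (pvHist nums).getD i 0
        = ((PySem.Set.ofList nums).countP (fun x => PySem.Int.bitCount x == i) : Int) := by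
  have hpre' : ∀ x ∈ PySem.Set.ofList nums, PySem.Int.bitCount x < 30 := by
    intro x hx; exact hpre x ((PySem.Set.mem_ofList nums x).mp hx)
  obtain ⟨h1, h2⟩ := pvHist_core (PySem.Set.ofList nums) (List.replicate 30 0) (by simp) hpre'
  refine ⟨h1, fun i => ?_⟩
  rw [pvHist_eq_foldl, h2 i, pvReplicate_getD]
  ring

lemma pvHist_nonneg (nums : List Int) (hpre : ∀ x ∈ nums, PySem.Int.bitCount x < 30) :
    ∀ y ∈ pvHist nums, 0 ≤ y := by
  intro y hy
  obtain ⟨j, hj, hye⟩ := List.mem_iff_getElem.mp hy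
  rw [← hye, ← List.getD_eq_getElem (pvHist nums) 0 hj, (pvHist_facts nums hpre).2 j]
  positivity

lemma pvHist_zero (nums : List Int) (hpre : ∀ x ∈ nums, PySem.Int.bitCount x < 30)
    (k : Int) (hz : ¬ ∃ x ∈ nums, (PySem.Int.bitCount x : Int) < 30 + k) :
    ∀ i : Nat, (i : Int) < 30 + k → (pvHist nums).getD i 0 = 0 := by
  intro i hi
  rw [(pvHist_facts nums hpre).2 i]
  have : (PySem.Set.ofList nums).countP (fun x => PySem.Int.bitCount x == i) = 0 := by
    rw [List.countP_eq_zero]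
    intro x hx hbe
    have hxn : x ∈ nums := (PySem.Set.mem_ofList nums x).mp hx
    have : PySem.Int.bitCount x = i := by simpa using hbe
    exact hz ⟨x, hxn, by omega⟩
  rw [this]; rfl

lemma pvHist_pos (nums : List Int) (hpre : ∀ x ∈ nums, PySem.Int.bitCount x < 30)
    (x : Int) (hx : x ∈ nums) :
    1 ≤ (pvHist nums).getD (PySem.Int.bitCount x) 0 := by
  rw [(pvHist_facts nums hpre).2 (PySem.Int.bitCount x)]
  have : 0 < (PySem.Set.ofList nums).countP (fun y => PySem.Int.bitCount y == PySem.Int.bitCount x) := by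
    rw [List.countP_pos_iff]
    exact ⟨x, (PySem.Set.mem_ofList nums x).mpr hx, by simp⟩
  omega


theorem countExcellentPairs_spec : Claim_unchanged_countExcellentPairs := by
  intro nums k _ hpre
  unfold Spec_countExcellentPairs
  intro hnd
  simp only [countExcellentPairs, countExcellentPairs_alt]
  have h30 : (pvHist nums).length = 30 := (pvHist_facts nums hpre).1
  have hs0 : (PySem.List.slice (pvHist nums) (some k) none).sum = pvS (pvHist nums) k := by
    rcases (by omega : 0 ≤ k ∨ k < 0) with hk | hk
    · exact pvSlice_nonneg (pvHist nums) k hk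
    · apply pvSlice_neg (pvHist nums) h30 k hk
      intro i hi
      by_cases h30k : -30 < k
      · have hz : ¬ ∃ x ∈ nums, (PySem.Int.bitCount x : Int) < 30 + k := by
          intro hex
          exact hnd ⟨h30k, hk, hex⟩
        exact pvHist_zero nums hpre k hz i hi
      · omega
  rw [pvA_sum (pvHist nums) h30 k _ hs0, pvBouter (pvHist nums) h30 k]

theorem countExcellentPairs_tight : Claim_exact_countExcellentPairs := by
  unfold Claim_exact_countExcellentPairs
  intro nums k _ hpre hd
  obtain ⟨hk1, hk2, x0, hx0, hpc0⟩ := hd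
  simp only [countExcellentPairs, countExcellentPairs_alt]
  have h30 : (pvHist nums).length = 30 := (pvHist_facts nums hpre).1
  have hnn : ∀ y ∈ pvHist nums, 0 ≤ y := pvHist_nonneg nums hpre
  have hs0 : (PySem.List.slice (pvHist nums) (some k) none).sum
      = ((pvHist nums).drop (30 + k).toNat).sum := by
    rw [PySem.List.slice_some_none, h30, pvClamp_neg k hk2]
  have hA : ((PySem.List.enumerate (pvHist nums) 0).foldl
      (fun (p : Int × Int) (e : Int × Int) =>
        (p.1 + e.2 * p.2,
         if 0 ≤ k - e.1 - 1 ∧ k - e.1 - 1 < 30 then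
           p.2 + PySem.List.pyGetD (pvHist nums) (k - e.1 - 1) 0
         else p.2))
      (0, (PySem.List.slice (pvHist nums) (some k) none).sum)).1
      = (pvHist nums).sum * ((pvHist nums).drop (30 + k).toNat).sum := by
    rw [hs0, pvAloop_neg (pvHist nums) k hk2 (pvHist nums) 0 0 _ le_rfl, zero_add]
  have hB : (PySem.List.pyRange 0 30 1).foldl
      (fun ans i =>
        (PySem.List.pyRange 0 30 1).foldl
          (fun ans j =>
            if k ≤ i + j then
              ans + PySem.List.pyGetD (pvHist nums) i 0 * PySem.List.pyGetD (pvHist nums) j 0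
            else ans)
          ans)
      0 = (pvHist nums).sum * (pvHist nums).sum := by
    rw [pvBouter (pvHist nums) h30 k]
    have hcong : (PySem.List.pyRange 0 30 1).map
          (fun i => PySem.List.pyGetD (pvHist nums) i 0 * pvS (pvHist nums) (k - i))
        = (PySem.List.pyRange 0 30 1).map
          (fun i => PySem.List.pyGetD (pvHist nums) i 0 * (pvHist nums).sum) := by
      apply List.map_congr_left
      intro i hi
      have h0i : 0 ≤ i ∧ i < 30 := by
        have := (PySem.List.mem_pyRange_one).mp hi
        omega
      have hmx : (max (k - i) 0).toNat = 0 := by omega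
      simp [pvS, hmx]
    rw [hcong, List.sum_map_mul_right]
    have hmp : (PySem.List.pyRange 0 30 1).map
        (fun i => PySem.List.pyGetD (pvHist nums) i 0) = pvHist nums := by
      have h30' : (30 : Int) = (PySem.List.len (pvHist nums) : Int) := by simp [h30]
      rw [h30']
      simpa using PySem.List.map_pyGetD_pyRange (pvHist nums) 0 le_rfl
    rw [hmp, mul_comm]
  rw [hA, hB]
  have hpc30 : PySem.Int.bitCount x0 < 30 := hpre x0 hx0
  have hidx : PySem.Int.bitCount x0 < (30 + k).toNat := by omega
  have hclen : (30 + k).toNat ≤ (pvHist nums).length := by omega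
  have hsplit : ((pvHist nums).take (30 + k).toNat).sum + ((pvHist nums).drop (30 + k).toNat).sum
      = (pvHist nums).sum := List.sum_take_add_sum_drop _ _
  have hlen_take : ((pvHist nums).take (30 + k).toNat).length = (30 + k).toNat := by
    simp [List.length_take]
    omega
  have hget : ((pvHist nums).take (30 + k).toNat).getD (PySem.Int.bitCount x0) 0
      = (pvHist nums).getD (PySem.Int.bitCount x0) 0 := by
    rw [List.getD_eq_getElem _ 0 (by omega), List.getD_eq_getElem _ 0 (by omega),
      List.getElem_take]
  have hent := pvSum_ge_entry ((pvHist nums).take (30 + k).toNat) (PySem.Int.bitCount x0)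
    (fun y hy => hnn y (List.mem_of_mem_take hy)) (by omega)
  have hpos := pvHist_pos nums hpre x0 hx0
  have htake1 : 1 ≤ ((pvHist nums).take (30 + k).toNat).sum := by omega
  have hdropnn : 0 ≤ ((pvHist nums).drop (30 + k).toNat).sum :=
    List.sum_nonneg (fun y hy => hnn y (List.mem_of_mem_drop hy))
  have hlt : (pvHist nums).sum * ((pvHist nums).drop (30 + k).toNat).sum
      < (pvHist nums).sum * (pvHist nums).sum := by
    apply mul_lt_mul_of_pos_left (by omega) (by omega)
  exact ne_of_lt hlt


set_option maxRecDepth 8192 in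
theorem countExcellentPairs_changed : Claim_changed_countExcellentPairs := by
  unfold Claim_changed_countExcellentPairs; decide
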